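-- pv_equiv track=rewrite | github.com/cloudforet-io/plugin-aws-cloud-service-inven-collector | src/spaceone/inventory/connector/aws_cloud_trail_connector/connector.py | _sort_trail_from_region
-- ===== SOURCE A (Python) =====
-- def _sort_trail_from_region(trails):
--     return_dic = {}
--
--     for _trail in trails:
--         trail_arn = _trail.get('TrailARN', '')
--         split_trail = trail_arn.split(':')
--         try:
--             region = split_trail[3]
--             if region in return_dic:
--                 return_dic[region].append(trail_arn)
--             else:
--                 return_dic[region] = [trail_arn]
--         except IndexError:
--             pass
--
--     return return_dic
-- ===== SOURCE B (Python) =====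
-- def _sort_trail_from_region(trails):
--     pairs = []
--     for _trail in trails:
--         trail_arn = _trail.get('TrailARN', '')
--         parts = trail_arn.split(':')
--         if len(parts) >= 4:
--             pairs.append((parts[3], trail_arn))
--     regions = list(dict.fromkeys(r for r, _ in pairs))
--     return {r: [a for rr, a in pairs if rr == r] for r in regions}
-- ===== Notes on version B (the rewrite author's own statement) =====
-- stated objective: alternative
-- what changed: Replaces A's single pass that grows per-region lists inside a dict (with an in-dict membership branch and try/except IndexError) by a two-phase pipeline: first extract a flat list of (region, arn) pairs guarded by an explicit length check, then build the result with an ordered dedup of the regions and one comprehension per region.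
import Mathlib
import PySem

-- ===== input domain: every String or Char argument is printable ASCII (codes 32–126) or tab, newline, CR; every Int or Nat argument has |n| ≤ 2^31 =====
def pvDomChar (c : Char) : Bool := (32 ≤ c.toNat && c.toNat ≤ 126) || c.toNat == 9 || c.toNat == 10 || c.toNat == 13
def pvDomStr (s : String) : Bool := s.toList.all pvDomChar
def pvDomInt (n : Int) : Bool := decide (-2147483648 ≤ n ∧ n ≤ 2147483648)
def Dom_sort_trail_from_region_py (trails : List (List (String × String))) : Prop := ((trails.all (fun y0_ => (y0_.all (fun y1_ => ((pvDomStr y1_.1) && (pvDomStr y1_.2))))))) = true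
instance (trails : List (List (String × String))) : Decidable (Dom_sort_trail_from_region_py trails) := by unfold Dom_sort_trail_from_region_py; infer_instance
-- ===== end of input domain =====

-- B replaces A's one-pass dict grouping by extract-pairs + ordered-dedup + per-region comprehensions (alternative decomposition, not faster).

-- ===== PORT A =====
-- the body of A's 'for _trail in trails' loop
def pvStepA (return_dic : PySem.Dict String (List String)) (_trail : List (String × String)) : PySem.Dict String (List String) :=
  let trail_arn := PySem.Dict.getD (PySem.Dict.mk _trail) "TrailARN" ""
  let split_trail := (PySem.Str.split? trail_arn ":").getD []   -- sep ":" ≠ "", so split? is always some here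
  match PySem.List.pyGet? split_trail 3 with                    -- none = IndexError → 'pass'
  | some region =>
      if PySem.Dict.contains return_dic region then
        return_dic.modify region [] (fun l => l ++ [trail_arn]) -- return_dic[region].append(trail_arn)
      else
        return_dic.insert region [trail_arn]
  | none => return_dic

def sort_trail_from_region_py (trails : List (List (String × String))) : List (String × List String) :=
  (trails.foldl pvStepA PySem.Dict.empty).items

-- ===== PORT B =====
-- the body of B's pair-collecting loop
def pvStepB (acc : List (String × String)) (_trail : List (String × String)) : List (String × String) :=
  let trail_arn := PySem.Dict.getD (PySem.Dict.mk _trail) "TrailARN" ""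
  let parts := (PySem.Str.split? trail_arn ":").getD []
  if 4 ≤ parts.length then acc ++ [(PySem.List.pyGetD parts 3 "", trail_arn)] else acc

def sort_trail_from_region_py_alt (trails : List (List (String × String))) : List (String × List String) :=
  let pairs := trails.foldl pvStepB []
  let regions := PySem.List.dedup (pairs.map (·.1))             -- list(dict.fromkeys(...))
  regions.map (fun r => (r, (pairs.filter (fun p => p.1 == r)).map (·.2)))

-- ===== PRECONDITION & SPEC =====
def Spec_sort_trail_from_region_py (trails : List (List (String × String))) (out : List (String × List String)) : Prop := out = sort_trail_from_region_py_alt trails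
instance (trails : List (List (String × String))) (out : List (String × List String)) : Decidable (Spec_sort_trail_from_region_py trails out) := by unfold Spec_sort_trail_from_region_py; infer_instance

-- ===== CLAIM (what is proved, stated in full; the proofs are below) =====
def Claim_equal_sort_trail_from_region_py : Prop := ∀ (trails : List (List (String × String))), Dom_sort_trail_from_region_py trails → Spec_sort_trail_from_region_py trails (sort_trail_from_region_py trails)

-- ===== LEMMAS AND PROOFS =====

-- the (region, arn) pair a trail contributes, if any
def pvExtract (_trail : List (String × String)) : Option (String × String) :=
  let trail_arn := PySem.Dict.getD (PySem.Dict.mk _trail) "TrailARN" ""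
  let parts := (PySem.Str.split? trail_arn ":").getD []
  (PySem.List.pyGet? parts 3).map (fun r => (r, trail_arn))

-- A's branch is exactly an unconditional modify
theorem pvBranch_eq_modify (d : PySem.Dict String (List String)) (r a : String) :
    (if PySem.Dict.contains d r then d.modify r [] (fun l => l ++ [a]) else d.insert r [a])
      = d.modify r [] (fun l => l ++ [a]) := by
  by_cases h : PySem.Dict.contains d r
  · simp [h]
  · have h' : PySem.Dict.contains d r = false := by simpa using h
    simp [h, PySem.Dict.modify, PySem.Dict.getD_of_not_contains _ _ h']

theorem pvStepA_extract (d : PySem.Dict String (List String)) (t : List (String × String)) :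
    pvStepA d t = match pvExtract t with
      | some p => d.modify p.1 [] (fun l => l ++ [p.2])
      | none => d := by
  unfold pvStepA pvExtract
  cases hx : PySem.List.pyGet? ((PySem.Str.split? (PySem.Dict.getD (PySem.Dict.mk t) "TrailARN" "") ":").getD []) 3 with
  | none => simp [hx]
  | some r => simp [hx, pvBranch_eq_modify]

theorem pvStepB_extract (acc : List (String × String)) (t : List (String × String)) :
    pvStepB acc t = match pvExtract t with
      | some p => acc ++ [p]
      | none => acc := by
  unfold pvStepB pvExtract
  by_cases h : 4 ≤ ((PySem.Str.split? (PySem.Dict.getD (PySem.Dict.mk t) "TrailARN" "") ":").getD []).length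
  · have h3 : 3 < ((PySem.Str.split? (PySem.Dict.getD (PySem.Dict.mk t) "TrailARN" "") ":").getD []).length := by omega
    have hg := PySem.List.pyGet?_ofNat _ 3 h3
    have hgd := PySem.List.pyGetD_ofNat _ 3 "" h3
    simp only [Nat.cast_ofNat] at hg hgd
    simp [h, hg, hgd]
  · have hg : PySem.List.pyGet? ((PySem.Str.split? (PySem.Dict.getD (PySem.Dict.mk t) "TrailARN" "") ":").getD []) 3 = none := by
      rw [PySem.List.pyGet?_eq_none_iff]
      simp [PySem.Raise.InRange]
      omega
    simp [h, hg]

-- A's fold over trails equals the modify-fold over extracted pairs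
theorem pvA_fold_eq (trails : List (List (String × String))) (d : PySem.Dict String (List String)) :
    trails.foldl pvStepA d
    = (trails.filterMap pvExtract).foldl (fun d p => d.modify p.1 [] (fun l => l ++ [p.2])) d := by
  induction trails generalizing d with
  | nil => rfl
  | cons t ts ih =>
      rw [List.foldl_cons, List.filterMap_cons, pvStepA_extract]
      cases pvExtract t with
      | none => exact ih d
      | some p => rw [List.foldl_cons]; exact ih _

-- B's pair-collecting fold equals the same filterMap
theorem pvB_pairs_eq (trails : List (List (String × String))) (acc : List (String × String)) :
    trails.foldl pvStepB acc = acc ++ trails.filterMap pvExtract := by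
  induction trails generalizing acc with
  | nil => simp
  | cons t ts ih =>
      rw [List.foldl_cons, List.filterMap_cons, pvStepB_extract]
      cases pvExtract t with
      | none => exact ih acc
      | some p => rw [ih]; simp

theorem pv_main (trails : List (List (String × String))) :
    sort_trail_from_region_py trails = sort_trail_from_region_py_alt trails := by
  unfold sort_trail_from_region_py sort_trail_from_region_py_alt
  rw [pvA_fold_eq, pvB_pairs_eq]
  simp only [List.nil_append]
  set ps := trails.filterMap pvExtract with hps
  have hnd : (ps.foldl (fun d p => d.modify p.1 [] (fun l => l ++ [p.2])) PySem.Dict.empty).keys.Nodup :=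
    PySem.Dict.nodup_keys_foldl_modify_key ps (fun p => p.1) [] (fun d p => (fun l => l ++ [p.2])) PySem.Dict.empty (by simp)
  rw [PySem.Dict.items_eq_map_keys _ hnd []]
  have hkeys : (ps.foldl (fun d p => d.modify p.1 [] (fun l => l ++ [p.2])) PySem.Dict.empty).keys
      = PySem.List.dedup (ps.map (·.1)) := by
    rw [PySem.Dict.keys_foldl_modify_key ps (fun p => p.1) [] (fun d p => (fun l => l ++ [p.2])) PySem.Dict.empty]
    rw [PySem.List.dedup_eq_ofList]
    exact PySem.Set.update_empty _
  rw [hkeys]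
  apply List.map_congr_left
  intro k _
  rw [PySem.Dict.getD_foldl_modify_append]
  simp

-- ===== VERDICT (by name: the statement is the Claim_ definition above) =====
theorem sort_trail_from_region_py_spec : Claim_equal_sort_trail_from_region_py := by
  intro trails _
  unfold Spec_sort_trail_from_region_py
  exact pv_main trails
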